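-- pv_equiv track=rewrite | github.com/Web-networks/image_generation | version_estimator.py | get_estimation
-- ===== SOURCE A (Python) =====
-- def get_estimation(version_tags, name_data, used_names):
--     available_tags = set(version_tags)
--     for name in used_names:
--         if name is not None and name in name_data:
--             available_tags &= set(name_data[name])
--     last_tag = None
--     first_tag = None
--     for i, tag in reversed(list(enumerate(version_tags))):
--         if last_tag is None and tag in available_tags:
--             last_tag = tag
--         if last_tag is not None and tag not in available_tags:
--             first_tag = tag
--     return first_tag, last_tag
-- ===== SOURCE B (Python) =====
-- def get_estimation(version_tags, name_data, used_names):
--     keys = [n for n in used_names if n is not None and n in name_data]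
--     allowed = [set(name_data[n]) for n in keys]
--
--     def ok(t):
--         return all(t in a for a in allowed)
--
--     last_tag = None
--     for t in version_tags:
--         if ok(t):
--             last_tag = t
--     i = 0
--     while i < len(version_tags) and ok(version_tags[i]):
--         i += 1
--     rest = version_tags[i:]
--     first_tag = rest[0] if any(ok(t) for t in rest) else None
--     return first_tag, last_tag
-- ===== Notes on version B (the rewrite author's own statement) =====
-- stated objective: simpler
-- what changed: B drops A's running set-intersection and its reverse scan with two interacting flags: it tests each tag's availability directly with all() over per-name sets, finds last_tag by a plain forward overwrite pass, and finds first_tag by stripping the leading run of available tags and checking whether an available tag still follows.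
import Mathlib
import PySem

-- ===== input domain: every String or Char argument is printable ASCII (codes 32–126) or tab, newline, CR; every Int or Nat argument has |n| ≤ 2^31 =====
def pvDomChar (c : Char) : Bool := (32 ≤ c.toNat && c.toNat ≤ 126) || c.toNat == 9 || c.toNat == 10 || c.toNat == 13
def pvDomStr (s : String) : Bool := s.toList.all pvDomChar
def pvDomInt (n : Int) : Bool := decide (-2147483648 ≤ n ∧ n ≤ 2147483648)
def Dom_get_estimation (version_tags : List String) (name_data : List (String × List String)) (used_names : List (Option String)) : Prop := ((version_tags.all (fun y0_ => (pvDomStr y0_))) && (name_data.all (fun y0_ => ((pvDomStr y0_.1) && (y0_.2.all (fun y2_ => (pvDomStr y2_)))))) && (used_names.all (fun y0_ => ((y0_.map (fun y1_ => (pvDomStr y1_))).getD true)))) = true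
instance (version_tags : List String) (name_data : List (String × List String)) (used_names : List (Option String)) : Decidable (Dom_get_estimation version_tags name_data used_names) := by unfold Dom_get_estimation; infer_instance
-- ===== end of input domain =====

-- B replaces A's set-intersection accumulator and reverse two-flag scan by a direct
-- availability test plus a forward overwrite pass (last) and a leading-run strip (first);
-- objective: simpler, same asymptotic cost.

-- ===== PORT A =====
def get_estimation (version_tags : List String) (name_data : List (String × List String)) (used_names : List (Option String)) : Option String × Option String :=
  let d := PySem.Dict.ofList name_data
  let available : PySem.Set String := used_names.foldl (fun acc name =>
      match name with
      | none => acc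
      | some n =>
        match d.get? n with
        | none => acc
        | some lst => PySem.Set.inter acc (PySem.Set.ofList lst)) (PySem.Set.ofList version_tags)
  let st := (PySem.List.enumerate version_tags 0).reverse.foldl
      (fun (st : Option String × Option String) p =>
        let tag := p.2
        let last := if st.1.isNone && PySem.Set.contains available tag then some tag else st.1
        let first := if last.isSome && !(PySem.Set.contains available tag) then some tag else st.2
        (last, first)) (none, none)
  (st.2, st.1)

-- ===== PORT B =====
def get_estimation_alt (version_tags : List String) (name_data : List (String × List String)) (used_names : List (Option String)) : Option String × Option String :=
  let d := PySem.Dict.ofList name_data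
  let keys := used_names.filterMap (fun n =>
      match n with
      | none => none
      | some s => if d.contains s then some s else none)
  let allowed := keys.map (fun n => PySem.Set.ofList (d.getD n []))
  let ok : String → Bool := fun t => allowed.all (fun a => a.contains t)
  let last := version_tags.foldl (fun acc t => if ok t then some t else acc) none
  let rest := version_tags.dropWhile ok
  let first := if rest.any ok then rest.head? else none
  (first, last)

-- ===== PRECONDITION & SPEC =====
def Spec_get_estimation (version_tags : List String) (name_data : List (String × List String)) (used_names : List (Option String)) (out : Option String × Option String) : Prop := out = get_estimation_alt version_tags name_data used_names
instance (version_tags : List String) (name_data : List (String × List String)) (used_names : List (Option String)) (out : Option String × Option String) : Decidable (Spec_get_estimation version_tags name_data used_names out) := by unfold Spec_get_estimation; infer_instance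

-- ===== CLAIM (what is proved, stated in full; the proofs are below) =====
def Claim_equal_get_estimation : Prop := ∀ (version_tags : List String) (name_data : List (String × List String)) (used_names : List (Option String)), Dom_get_estimation version_tags name_data used_names → Spec_get_estimation version_tags name_data used_names (get_estimation version_tags name_data used_names)

-- ===== LEMMAS AND PROOFS =====

-- membership in A's intersected available set, as a Bool formula over B's filtered key list
theorem contains_avail_fold (d : PySem.Dict String (List String)) (un : List (Option String))
    (s : PySem.Set String) (t : String) :
    PySem.Set.contains (un.foldl (fun acc name =>
      match name with
      | none => acc
      | some n =>
        match d.get? n with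
        | none => acc
        | some lst => PySem.Set.inter acc (PySem.Set.ofList lst)) s) t
    = (PySem.Set.contains s t &&
       (un.filterMap (fun n =>
          match n with
          | none => none
          | some s' => if d.contains s' then some s' else none)).all (fun n => (d.getD n []).contains t)) := by
  induction un generalizing s with
  | nil => simp
  | cons a un ih =>
    cases a with
    | none => simpa using ih s
    | some n =>
      cases h : d.get? n with
      | none =>
        have hc : d.contains n = false := by
          rw [PySem.Dict.contains_eq_isSome_get?, h]; rfl
        simp only [List.foldl_cons, List.filterMap_cons, h, hc]
        simpa using ih s
      | some lst =>
        have hc : d.contains n = true := by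
          rw [PySem.Dict.contains_eq_isSome_get?, h]; rfl
        have hgd : d.getD n [] = lst := by
          rw [PySem.Dict.getD_eq_get?_getD, h]; rfl
        simp only [List.foldl_cons, List.filterMap_cons, h, hc]
        rw [ih]
        simp [hgd, Bool.and_assoc]

-- the forward overwrite pass, with an arbitrary initial accumulator
theorem foldl_ow_init (p : String → Bool) (xs : List String) (i : Option String) :
    xs.foldl (fun acc t => if p t then some t else acc) i
    = (xs.foldl (fun acc t => if p t then some t else acc) none).or i := by
  induction xs generalizing i with
  | nil => simp
  | cons a xs ih =>
    simp only [List.foldl_cons]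
    rw [ih (if p a then some a else i), ih (if p a then some a else none)]
    cases hL : xs.foldl (fun acc t => if p t then some t else acc) none <;>
      cases hp : p a <;> simp

-- the overwrite pass is `none` exactly when no element satisfies p
theorem foldl_ow_none_iff (p : String → Bool) (xs : List String) :
    (xs.foldl (fun acc t => if p t then some t else acc) none = none) ↔ xs.any p = false := by
  induction xs with
  | nil => simp
  | cons a xs ih =>
    simp only [List.foldl_cons, List.any_cons]
    rw [foldl_ow_init]
    cases hL : xs.foldl (fun acc t => if p t then some t else acc) none <;>
      cases hp : p a <;> simp_all

-- A's reverse two-flag loop computes exactly B's two closed forms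
theorem loopA_eq (p : String → Bool) (xs : List String) :
    xs.reverse.foldl (fun (st : Option String × Option String) tag =>
        (if st.1.isNone && p tag then some tag else st.1,
         if (if st.1.isNone && p tag then some tag else st.1).isSome && !(p tag) then some tag
         else st.2)) (none, none)
    = (xs.foldl (fun acc t => if p t then some t else acc) none,
       if (xs.dropWhile p).any p then (xs.dropWhile p).head? else none) := by
  induction xs with
  | nil => simp
  | cons a xs ih =>
    rw [List.reverse_cons, List.foldl_append, List.foldl_cons, List.foldl_nil, ih]
    rw [List.foldl_cons, foldl_ow_init p xs (if p a then some a else none),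
        List.dropWhile_cons]
    cases hp : p a with
    | true =>
      cases hL : xs.foldl (fun acc t => if p t then some t else acc) none <;>
        simp
    | false =>
      cases hL : xs.foldl (fun acc t => if p t then some t else acc) none with
      | none =>
        have hany : xs.any p = false := (foldl_ow_none_iff p xs).mp hL
        have hdw : (xs.dropWhile p).any p = false := by
          rw [List.any_eq_false] at hany ⊢
          exact fun x hx => hany x ((List.dropWhile_sublist p).subset hx)
        simp [hp, hdw, hany]
      | some v =>
        have hany : xs.any p = true := by
          cases h2 : xs.any p
          · rw [(foldl_ow_none_iff p xs).mpr h2] at hL; cases hL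
          · rfl
        simp [hp, hany]

-- the two predicates agree on every version tag
theorem pred_agree (version_tags : List String) (name_data : List (String × List String))
    (used_names : List (Option String)) (t : String) (ht : t ∈ version_tags) :
    PySem.Set.contains (used_names.foldl (fun acc name =>
      match name with
      | none => acc
      | some n =>
        match (PySem.Dict.ofList name_data).get? n with
        | none => acc
        | some lst => PySem.Set.inter acc (PySem.Set.ofList lst)) (PySem.Set.ofList version_tags)) t
    = (used_names.filterMap (fun n =>
        match n with
        | none => none
        | some s' => if (PySem.Dict.ofList name_data).contains s' then some s' else none)).all
        (fun n => ((PySem.Dict.ofList name_data).getD n []).contains t) := by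
  rw [contains_avail_fold]
  have hmem : PySem.Set.contains (PySem.Set.ofList version_tags) t = true := by
    rw [PySem.Set.contains_iff]
    exact (PySem.Set.mem_ofList _ _).mpr ht
  rw [hmem, Bool.true_and]

-- overwrite pass only depends on p's values on the list
theorem foldl_ow_congr (p q : String → Bool) (xs : List String)
    (h : ∀ t ∈ xs, p t = q t) (i : Option String) :
    xs.foldl (fun acc t => if p t then some t else acc) i
    = xs.foldl (fun acc t => if q t then some t else acc) i := by
  induction xs generalizing i with
  | nil => rfl
  | cons a xs ih =>
    simp only [List.foldl_cons]
    rw [h a (by simp), ih (fun t ht => h t (by simp [ht]))]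

theorem dropWhile_congr' (p q : String → Bool) (xs : List String)
    (h : ∀ t ∈ xs, p t = q t) : xs.dropWhile p = xs.dropWhile q := by
  induction xs with
  | nil => rfl
  | cons a xs ih =>
    simp only [List.dropWhile_cons]
    rw [h a (by simp), ih (fun t ht => h t (by simp [ht]))]

theorem any_congr' (p q : String → Bool) (xs : List String)
    (h : ∀ t ∈ xs, p t = q t) : xs.any p = xs.any q := by
  induction xs with
  | nil => rfl
  | cons a xs ih =>
    simp only [List.any_cons]
    rw [h a (by simp), ih (fun t ht => h t (by simp [ht]))]

-- A's loop body never uses the enumerate index: the same fold over the reversed tags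
theorem enum_elim (av : PySem.Set String) (xs : List String) :
    (PySem.List.enumerate xs 0).reverse.foldl
      (fun (st : Option String × Option String) p =>
        (if st.1.isNone && av.contains p.2 then some p.2 else st.1,
         if (if st.1.isNone && av.contains p.2 then some p.2 else st.1).isSome && !(av.contains p.2)
         then some p.2 else st.2)) (none, none)
    = xs.reverse.foldl
      (fun (st : Option String × Option String) tag =>
        (if st.1.isNone && av.contains tag then some tag else st.1,
         if (if st.1.isNone && av.contains tag then some tag else st.1).isSome && !(av.contains tag)
         then some tag else st.2)) (none, none) := by
  have h1 : ((PySem.List.enumerate xs 0).reverse.map (fun q : Int × String => q.2)) = xs.reverse := by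
    rw [List.map_reverse, PySem.List.map_snd_enumerate]
  rw [← h1, List.foldl_map]

theorem loopA_eq' (av : PySem.Set String) (xs : List String) :
    xs.reverse.foldl
      (fun (st : Option String × Option String) tag =>
        (if st.1.isNone && av.contains tag then some tag else st.1,
         if (if st.1.isNone && av.contains tag then some tag else st.1).isSome && !(av.contains tag)
         then some tag else st.2)) (none, none)
    = (xs.foldl (fun acc t => if av.contains t then some t else acc) none,
       if (xs.dropWhile (fun t => av.contains t)).any (fun t => av.contains t)
       then (xs.dropWhile (fun t => av.contains t)).head? else none) :=
  loopA_eq (fun t => av.contains t) xs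

-- B's availability test over precomputed sets equals the direct list-membership test
theorem all_map_contains (d : PySem.Dict String (List String)) (keys : List String) (t : String) :
    (keys.map (fun n => PySem.Set.ofList (d.getD n []))).all (fun a => PySem.Set.contains a t)
    = keys.all (fun n => (d.getD n []).contains t) := by
  rw [List.all_map]
  refine List.all_congr rfl fun n => ?_
  show PySem.Set.contains (PySem.Set.ofList (d.getD n [])) t = (d.getD n []).contains t
  by_cases h : t ∈ d.getD n [] <;>
    simp [PySem.Set.contains_eq_listContains, PySem.Set.mem_ofList, h]

-- ===== VERDICT (by name: the statement is the Claim_ definition above) =====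
theorem get_estimation_spec : Claim_equal_get_estimation := by
  intro version_tags name_data used_names _
  unfold Spec_get_estimation get_estimation get_estimation_alt
  simp only []
  generalize hav : (List.foldl (fun acc name =>
      match name with
      | none => acc
      | some n =>
        match (PySem.Dict.ofList name_data).get? n with
        | none => acc
        | some lst => PySem.Set.inter acc (PySem.Set.ofList lst))
      (PySem.Set.ofList version_tags) used_names) = av
  have hagree : ∀ t ∈ version_tags, av.contains t
      = ((used_names.filterMap (fun n =>
          match n with
          | none => none
          | some s' => if (PySem.Dict.ofList name_data).contains s' then some s' else none)).map
          (fun n => PySem.Set.ofList ((PySem.Dict.ofList name_data).getD n []))).all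
          (fun a => PySem.Set.contains a t) := by
    intro t ht
    rw [all_map_contains, ← hav]
    exact pred_agree version_tags name_data used_names t ht
  rw [enum_elim av version_tags, loopA_eq' av version_tags]
  have hLcomp := foldl_ow_congr (fun t => av.contains t)
      (fun t => ((used_names.filterMap (fun n =>
          match n with
          | none => none
          | some s' => if (PySem.Dict.ofList name_data).contains s' then some s' else none)).map
          (fun n => PySem.Set.ofList ((PySem.Dict.ofList name_data).getD n []))).all
          (fun a => PySem.Set.contains a t))
      version_tags hagree none
  have hdw := dropWhile_congr' (fun t => av.contains t)
      (fun t => ((used_names.filterMap (fun n =>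
          match n with
          | none => none
          | some s' => if (PySem.Dict.ofList name_data).contains s' then some s' else none)).map
          (fun n => PySem.Set.ofList ((PySem.Dict.ofList name_data).getD n []))).all
          (fun a => PySem.Set.contains a t))
      version_tags hagree
  have hany := any_congr' (fun t => av.contains t)
      (fun t => ((used_names.filterMap (fun n =>
          match n with
          | none => none
          | some s' => if (PySem.Dict.ofList name_data).contains s' then some s' else none)).map
          (fun n => PySem.Set.ofList ((PySem.Dict.ofList name_data).getD n []))).all
          (fun a => PySem.Set.contains a t))
      (version_tags.dropWhile (fun t => av.contains t))
      (fun t ht => hagree t ((List.dropWhile_sublist _).subset ht))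
  rw [hLcomp, hdw] at *
  rw [hany]
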